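-- pv_equiv track=rewrite | github.com/peytontolbert/agent_kernel | agent_kernel/universe_improvement.py | _more_restrictive_mode
-- ===== SOURCE A (Python) =====
-- UNIVERSE_ENVIRONMENT_ASSUMPTION_ENUM_FIELDS = {
--     "git_write_mode": {"blocked", "operator_gated", "task_scoped"},
--     "network_access_mode": {"blocked", "allowlist_only", "open"},
--     "workspace_write_scope": {"task_only", "generated_only", "shared_repo_gated"},
-- }
--
-- def _more_restrictive_mode(field: str, left: str, right: str) -> str:
--     allowed_values = UNIVERSE_ENVIRONMENT_ASSUMPTION_ENUM_FIELDS[field]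
--     if field == "network_access_mode":
--         order = ("blocked", "allowlist_only", "open")
--     elif field == "git_write_mode":
--         order = ("blocked", "operator_gated", "task_scoped")
--     else:
--         order = ("task_only", "generated_only", "shared_repo_gated")
--     rank = {value: index for index, value in enumerate(order) if value in allowed_values}
--     normalized_left = left if left in rank else order[0]
--     normalized_right = right if right in rank else order[0]
--     return normalized_left if rank[normalized_left] <= rank[normalized_right] else normalized_right
-- ===== SOURCE B (Python) =====
-- UNIVERSE_ENVIRONMENT_ASSUMPTION_ENUM_FIELDS = {
--     "git_write_mode": {"blocked", "operator_gated", "task_scoped"},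
--     "network_access_mode": {"blocked", "allowlist_only", "open"},
--     "workspace_write_scope": {"task_only", "generated_only", "shared_repo_gated"},
-- }
--
-- # Most-restrictive value of each field (used to normalize unknown inputs).
-- _FIELD_DEFAULT = {
--     "git_write_mode": "blocked",
--     "network_access_mode": "blocked",
--     "workspace_write_scope": "task_only",
-- }
--
-- # Precomputed meet table: _MEET[field][(x, y)] is the more restrictive of x and y.
-- # The restriction order is a total order, so the meet is just the earlier value;
-- # tabulating it removes all ordering logic from the function itself.
-- _MEET = {
--     "git_write_mode": {
--         ("blocked", "blocked"): "blocked",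
--         ("blocked", "operator_gated"): "blocked",
--         ("blocked", "task_scoped"): "blocked",
--         ("operator_gated", "blocked"): "blocked",
--         ("operator_gated", "operator_gated"): "operator_gated",
--         ("operator_gated", "task_scoped"): "operator_gated",
--         ("task_scoped", "blocked"): "blocked",
--         ("task_scoped", "operator_gated"): "operator_gated",
--         ("task_scoped", "task_scoped"): "task_scoped",
--     },
--     "network_access_mode": {
--         ("blocked", "blocked"): "blocked",
--         ("blocked", "allowlist_only"): "blocked",
--         ("blocked", "open"): "blocked",
--         ("allowlist_only", "blocked"): "blocked",
--         ("allowlist_only", "allowlist_only"): "allowlist_only",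
--         ("allowlist_only", "open"): "allowlist_only",
--         ("open", "blocked"): "blocked",
--         ("open", "allowlist_only"): "allowlist_only",
--         ("open", "open"): "open",
--     },
--     "workspace_write_scope": {
--         ("task_only", "task_only"): "task_only",
--         ("task_only", "generated_only"): "task_only",
--         ("task_only", "shared_repo_gated"): "task_only",
--         ("generated_only", "task_only"): "task_only",
--         ("generated_only", "generated_only"): "generated_only",
--         ("generated_only", "shared_repo_gated"): "generated_only",
--         ("shared_repo_gated", "task_only"): "task_only",
--         ("shared_repo_gated", "generated_only"): "generated_only",
--         ("shared_repo_gated", "shared_repo_gated"): "shared_repo_gated",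
--     },
-- }
--
-- def _more_restrictive_mode(field: str, left: str, right: str) -> str:
--     allowed_values = UNIVERSE_ENVIRONMENT_ASSUMPTION_ENUM_FIELDS[field]
--     default = _FIELD_DEFAULT[field]
--     normalized_left = left if left in allowed_values else default
--     normalized_right = right if right in allowed_values else default
--     return _MEET[field][(normalized_left, normalized_right)]
-- ===== Notes on version B (the rewrite author's own statement) =====
-- stated objective: alternative
-- what changed: B replaces A's runtime construction of a rank dictionary and integer-index comparison by a precomputed literal meet table: it normalizes the two values against the field's allowed set and returns _MEET[field][(nl, nr)] with one lookup, performing no ordering computation at all.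
import Mathlib
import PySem

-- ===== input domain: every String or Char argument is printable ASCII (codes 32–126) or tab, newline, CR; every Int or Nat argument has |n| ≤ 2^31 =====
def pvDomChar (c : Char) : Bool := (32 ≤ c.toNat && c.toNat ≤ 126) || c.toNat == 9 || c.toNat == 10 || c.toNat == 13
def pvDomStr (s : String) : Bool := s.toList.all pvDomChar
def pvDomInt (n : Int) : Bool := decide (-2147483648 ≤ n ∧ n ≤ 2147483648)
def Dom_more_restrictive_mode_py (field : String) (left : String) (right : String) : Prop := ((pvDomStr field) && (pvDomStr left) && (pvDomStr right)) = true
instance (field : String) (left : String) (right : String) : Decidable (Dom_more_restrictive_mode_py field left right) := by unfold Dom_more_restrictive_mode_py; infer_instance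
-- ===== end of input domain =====

-- B replaces A's rank-dictionary-and-index comparison by a precomputed literal meet table looked up once per call; equal on all fields the module's enum table defines.


-- module-level constant UNIVERSE_ENVIRONMENT_ASSUMPTION_ENUM_FIELDS (shared by both Pythons)
def pvEnumFields : PySem.Dict String (PySem.Set String) :=
  PySem.Dict.ofList
    [("git_write_mode", PySem.Set.ofList ["blocked", "operator_gated", "task_scoped"]),
     ("network_access_mode", PySem.Set.ofList ["blocked", "allowlist_only", "open"]),
     ("workspace_write_scope", PySem.Set.ofList ["task_only", "generated_only", "shared_repo_gated"])]

-- ===== PORT A =====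
def more_restrictive_mode_py (field : String) (left : String) (right : String) : String :=
  -- KeyError on an unknown field: excluded by Pre_, the .getD default is never used there
  let allowed_values : PySem.Set String := (PySem.Dict.get? pvEnumFields field).getD PySem.Set.empty
  let order : List String :=
    if field == "network_access_mode" then ["blocked", "allowlist_only", "open"]
    else if field == "git_write_mode" then ["blocked", "operator_gated", "task_scoped"]
    else ["task_only", "generated_only", "shared_repo_gated"]
  let rank : PySem.Dict String Int :=
    (PySem.List.enumerate order 0).foldl
      (fun d p => if PySem.Set.contains allowed_values p.2 then d.insert p.2 p.1 else d)
      PySem.Dict.empty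
  let normalized_left := if rank.contains left then left else (PySem.List.pyGet? order 0).getD ""
  let normalized_right := if rank.contains right then right else (PySem.List.pyGet? order 0).getD ""
  if rank.getD normalized_left 0 ≤ rank.getD normalized_right 0 then normalized_left else normalized_right

-- ===== PORT B =====
-- module-level constant _FIELD_DEFAULT of Source B
def pvFieldDefault : PySem.Dict String String :=
  PySem.Dict.ofList
    [("git_write_mode", "blocked"),
     ("network_access_mode", "blocked"),
     ("workspace_write_scope", "task_only")]

-- module-level constant _MEET of Source B: the precomputed literal meet table
def pvMeet : PySem.Dict String (PySem.Dict (String × String) String) :=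
  PySem.Dict.ofList
    [("git_write_mode", PySem.Dict.ofList
        [(("blocked", "blocked"), "blocked"),
         (("blocked", "operator_gated"), "blocked"),
         (("blocked", "task_scoped"), "blocked"),
         (("operator_gated", "blocked"), "blocked"),
         (("operator_gated", "operator_gated"), "operator_gated"),
         (("operator_gated", "task_scoped"), "operator_gated"),
         (("task_scoped", "blocked"), "blocked"),
         (("task_scoped", "operator_gated"), "operator_gated"),
         (("task_scoped", "task_scoped"), "task_scoped")]),
     ("network_access_mode", PySem.Dict.ofList
        [(("blocked", "blocked"), "blocked"),
         (("blocked", "allowlist_only"), "blocked"),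
         (("blocked", "open"), "blocked"),
         (("allowlist_only", "blocked"), "blocked"),
         (("allowlist_only", "allowlist_only"), "allowlist_only"),
         (("allowlist_only", "open"), "allowlist_only"),
         (("open", "blocked"), "blocked"),
         (("open", "allowlist_only"), "allowlist_only"),
         (("open", "open"), "open")]),
     ("workspace_write_scope", PySem.Dict.ofList
        [(("task_only", "task_only"), "task_only"),
         (("task_only", "generated_only"), "task_only"),
         (("task_only", "shared_repo_gated"), "task_only"),
         (("generated_only", "task_only"), "task_only"),
         (("generated_only", "generated_only"), "generated_only"),
         (("generated_only", "shared_repo_gated"), "generated_only"),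
         (("shared_repo_gated", "task_only"), "task_only"),
         (("shared_repo_gated", "generated_only"), "generated_only"),
         (("shared_repo_gated", "shared_repo_gated"), "shared_repo_gated")])]

def more_restrictive_mode_py_alt (field : String) (left : String) (right : String) : String :=
  -- KeyError on an unknown field: excluded by Pre_, the .getD defaults are never used there
  let allowed_values : PySem.Set String := (PySem.Dict.get? pvEnumFields field).getD PySem.Set.empty
  let dflt : String := (PySem.Dict.get? pvFieldDefault field).getD ""
  let normalized_left := if PySem.Set.contains allowed_values left then left else dflt
  let normalized_right := if PySem.Set.contains allowed_values right then right else dflt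
  ((PySem.Dict.get? pvMeet field).getD PySem.Dict.empty).getD (normalized_left, normalized_right) ""

-- ===== PRECONDITION & SPEC =====
-- Pre_ excludes unknown fields, where both Pythons raise KeyError on the module's enum table.
def Pre_more_restrictive_mode_py (field : String) (left : String) (right : String) : Prop :=
  field = "git_write_mode" ∨ field = "network_access_mode" ∨ field = "workspace_write_scope"
instance (field : String) (left : String) (right : String) : Decidable (Pre_more_restrictive_mode_py field left right) := by unfold Pre_more_restrictive_mode_py; infer_instance
def pvWitness_more_restrictive_mode_py : String × String × String := ("git_write_mode", "task_scoped", "blocked")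

def Spec_more_restrictive_mode_py (field : String) (left : String) (right : String) (out : String) : Prop := out = more_restrictive_mode_py_alt field left right
instance (field : String) (left : String) (right : String) (out : String) : Decidable (Spec_more_restrictive_mode_py field left right out) := by unfold Spec_more_restrictive_mode_py; infer_instance

-- ===== CLAIM (what is proved, stated in full; the proofs are below) =====
def Claim_equal_more_restrictive_mode_py : Prop := ∀ (field : String) (left : String) (right : String), Dom_more_restrictive_mode_py field left right → Pre_more_restrictive_mode_py field left right → Spec_more_restrictive_mode_py field left right (more_restrictive_mode_py field left right)

-- ===== LEMMAS AND PROOFS =====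
-- With the field fixed by Pre_, each port reduces definitionally (pvA_*/pvB_*, by rfl) to a small
-- residual term over the argument strings; contains-tests become decidable disjunctions, and a
-- finite case analysis over membership closes every goal by evaluation.

def pvRkGit : PySem.Dict String Int := PySem.Dict.mk [("blocked", 0), ("operator_gated", 1), ("task_scoped", 2)]
def pvRkNet : PySem.Dict String Int := PySem.Dict.mk [("blocked", 0), ("allowlist_only", 1), ("open", 2)]
def pvRkWs : PySem.Dict String Int := PySem.Dict.mk [("task_only", 0), ("generated_only", 1), ("shared_repo_gated", 2)]

theorem pvA_git (l r : String) : more_restrictive_mode_py "git_write_mode" l r =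
    (let nl := if pvRkGit.contains l then l else "blocked"
     let nr := if pvRkGit.contains r then r else "blocked"
     if pvRkGit.getD nl 0 ≤ pvRkGit.getD nr 0 then nl else nr) := rfl
theorem pvA_net (l r : String) : more_restrictive_mode_py "network_access_mode" l r =
    (let nl := if pvRkNet.contains l then l else "blocked"
     let nr := if pvRkNet.contains r then r else "blocked"
     if pvRkNet.getD nl 0 ≤ pvRkNet.getD nr 0 then nl else nr) := rfl
theorem pvA_ws (l r : String) : more_restrictive_mode_py "workspace_write_scope" l r =
    (let nl := if pvRkWs.contains l then l else "task_only"
     let nr := if pvRkWs.contains r then r else "task_only"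
     if pvRkWs.getD nl 0 ≤ pvRkWs.getD nr 0 then nl else nr) := rfl

theorem pvB_git (l r : String) : more_restrictive_mode_py_alt "git_write_mode" l r =
    (let nl := if PySem.Set.contains ["blocked", "operator_gated", "task_scoped"] l then l else "blocked"
     let nr := if PySem.Set.contains ["blocked", "operator_gated", "task_scoped"] r then r else "blocked"
     ((PySem.Dict.get? pvMeet "git_write_mode").getD PySem.Dict.empty).getD (nl, nr) "") := rfl
theorem pvB_net (l r : String) : more_restrictive_mode_py_alt "network_access_mode" l r =
    (let nl := if PySem.Set.contains ["blocked", "allowlist_only", "open"] l then l else "blocked"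
     let nr := if PySem.Set.contains ["blocked", "allowlist_only", "open"] r then r else "blocked"
     ((PySem.Dict.get? pvMeet "network_access_mode").getD PySem.Dict.empty).getD (nl, nr) "") := rfl
theorem pvB_ws (l r : String) : more_restrictive_mode_py_alt "workspace_write_scope" l r =
    (let nl := if PySem.Set.contains ["task_only", "generated_only", "shared_repo_gated"] l then l else "task_only"
     let nr := if PySem.Set.contains ["task_only", "generated_only", "shared_repo_gated"] r then r else "task_only"
     ((PySem.Dict.get? pvMeet "workspace_write_scope").getD PySem.Dict.empty).getD (nl, nr) "") := rfl

theorem pvSet_mem (a b c s : String) :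
    PySem.Set.contains [a, b, c] s = decide (s = a ∨ s = b ∨ s = c) := by
  simp [PySem.Set.contains, eq_comm]
theorem pvRkGit_mem (s : String) :
    pvRkGit.contains s = decide (s = "blocked" ∨ s = "operator_gated" ∨ s = "task_scoped") := by
  simp [pvRkGit, PySem.Dict.contains, Bool.beq_eq_decide_eq]
  simp [@eq_comm String]
theorem pvRkNet_mem (s : String) :
    pvRkNet.contains s = decide (s = "blocked" ∨ s = "allowlist_only" ∨ s = "open") := by
  simp [pvRkNet, PySem.Dict.contains, Bool.beq_eq_decide_eq]
  simp [@eq_comm String]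
theorem pvRkWs_mem (s : String) :
    pvRkWs.contains s = decide (s = "task_only" ∨ s = "generated_only" ∨ s = "shared_repo_gated") := by
  simp [pvRkWs, PySem.Dict.contains, Bool.beq_eq_decide_eq]
  simp [@eq_comm String]

-- ===== VERDICT (by name: the statement is the Claim_ definition above) =====
theorem more_restrictive_mode_py_spec : Claim_equal_more_restrictive_mode_py := by
  intro field left right _ hpre
  unfold Spec_more_restrictive_mode_py
  rcases hpre with h | h | h <;> subst h
  · rw [pvA_git, pvB_git]
    by_cases hl : left = "blocked" ∨ left = "operator_gated" ∨ left = "task_scoped" <;>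
      by_cases hr : right = "blocked" ∨ right = "operator_gated" ∨ right = "task_scoped" <;>
      simp only [pvRkGit_mem, pvSet_mem] <;>
      first
        | (rcases hl with rfl | rfl | rfl <;> rcases hr with rfl | rfl | rfl <;> decide)
        | (rcases hl with rfl | rfl | rfl <;> simp [hr] <;> decide)
        | (rcases hr with rfl | rfl | rfl <;> simp [hl] <;> decide)
        | (simp [hl, hr] <;> decide)
  · rw [pvA_net, pvB_net]
    by_cases hl : left = "blocked" ∨ left = "allowlist_only" ∨ left = "open" <;>
      by_cases hr : right = "blocked" ∨ right = "allowlist_only" ∨ right = "open" <;>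
      simp only [pvRkNet_mem, pvSet_mem] <;>
      first
        | (rcases hl with rfl | rfl | rfl <;> rcases hr with rfl | rfl | rfl <;> decide)
        | (rcases hl with rfl | rfl | rfl <;> simp [hr] <;> decide)
        | (rcases hr with rfl | rfl | rfl <;> simp [hl] <;> decide)
        | (simp [hl, hr] <;> decide)
  · rw [pvA_ws, pvB_ws]
    by_cases hl : left = "task_only" ∨ left = "generated_only" ∨ left = "shared_repo_gated" <;>
      by_cases hr : right = "task_only" ∨ right = "generated_only" ∨ right = "shared_repo_gated" <;>
      simp only [pvRkWs_mem, pvSet_mem] <;>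
      first
        | (rcases hl with rfl | rfl | rfl <;> rcases hr with rfl | rfl | rfl <;> decide)
        | (rcases hl with rfl | rfl | rfl <;> simp [hr] <;> decide)
        | (rcases hr with rfl | rfl | rfl <;> simp [hl] <;> decide)
        | (simp [hl, hr] <;> decide)
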